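-- pv_equiv track=rewrite | github.com/AlexWUrobot/leetcode_python | count_fault.py | countFaults
-- ===== SOURCE A (Python) =====
-- def countFaults(n, logs):
--     # Initialize a dictionary to keep track of server errors
--     error_counts = {f's{i}': 0 for i in range(1, n+1)}
--     replacements = 0
--
--     # Iterate through the logs
--     for log in logs:
--         server_id, status = log.split()
--
--         # Reset the error count for successes, increment for errors
--         if status == 'success':
--             error_counts[server_id] = 0
--         else:
--             error_counts[server_id] += 1
--
--             # If a server has 3 consecutive errors, replace it
--             if error_counts[server_id] == 3:
--                 replacements += 1
--                 error_counts[server_id] = 0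
--
--     return replacements
-- ===== SOURCE B (Python) =====
-- def countFaults(n, logs):
--     # Phase 1: group the statuses per server (fixed keys, so an unknown
--     # server id raises KeyError).
--     groups = {f's{i}': [] for i in range(1, n + 1)}
--     for log in logs:
--         server_id, status = log.split()
--         groups[server_id].append(status)
--     # Phase 2: per server, each maximal run of consecutive errors of
--     # length L contributes L // 3 replacements.
--     total = 0
--     for statuses in groups.values():
--         run = 0
--         for st in statuses:
--             if st == 'success':
--                 total += run // 3
--                 run = 0
--             else:
--                 run += 1
--         total += run // 3
--     return total
-- ===== Notes on version B (the rewrite author's own statement) =====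
-- stated objective: alternative
-- what changed: Instead of one interleaved pass keeping a per-server mod-3 error counter and replacing on the fly, B first groups the statuses per server and then counts run_length // 3 for each maximal error run of each server; Pre_ excludes logs that do not split into exactly two tokens (A raises ValueError) and logs naming a server id outside 's1'..'sn' (A raises KeyError on an error status for an unseen id, and A's silent acceptance of an unknown id whose entries start with 'success' is an artefact of dict assignment on which B's fixed-key dict raises KeyError).
-- outside the precondition, e.g. on countFaults(1, ['s2 success']): A returns 0, B raises KeyError; on countFaults(1, ['hello']): A raises ValueError, B raises ValueError; on countFaults(1, ['s2 error']): A raises KeyError, B raises KeyError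
import Mathlib
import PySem

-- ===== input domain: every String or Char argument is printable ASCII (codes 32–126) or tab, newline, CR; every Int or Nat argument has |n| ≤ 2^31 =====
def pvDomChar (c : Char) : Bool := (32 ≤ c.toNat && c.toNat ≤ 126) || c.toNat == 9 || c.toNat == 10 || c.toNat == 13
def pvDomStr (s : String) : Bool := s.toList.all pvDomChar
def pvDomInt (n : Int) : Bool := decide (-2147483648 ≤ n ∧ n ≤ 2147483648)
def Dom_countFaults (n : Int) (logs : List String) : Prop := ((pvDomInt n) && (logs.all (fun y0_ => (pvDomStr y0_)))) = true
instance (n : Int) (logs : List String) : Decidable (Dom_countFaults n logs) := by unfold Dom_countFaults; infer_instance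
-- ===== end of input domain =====

-- B re-implements A by grouping the statuses per server first and then counting
-- run_length // 3 per maximal error run, instead of A's single interleaved pass
-- with a per-server mod-3 counter; same cost, different decomposition.

-- ===== PORT A =====
-- shared unpacking of "server_id, status = log.split()" (none = ValueError, excluded by Pre_)
def pvSplitLog (log : String) : Option (String × String) :=
  match PySem.Str.split₀ log with
  | [server_id, status] => some (server_id, status)
  | _ => none

def countFaults (n : Int) (logs : List String) : Int :=
  -- error_counts = {f's{i}': 0 for i in range(1, n+1)}
  let ec0 : PySem.Dict String Int :=
    (PySem.List.pyRange 1 (n+1) 1).foldl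
      (fun d i => d.insert ("s" ++ PySem.Int.toStr i) 0) PySem.Dict.empty
  let res := logs.foldl (fun (s : PySem.Dict String Int × Int) log =>
      (pvSplitLog log).elim s (fun p =>
        if p.2 = "success" then (s.1.insert p.1 0, s.2)
        else
          let c := s.1.getD p.1 0 + 1
          if c = 3 then (s.1.insert p.1 0, s.2 + 1)
          else (s.1.insert p.1 c, s.2)))
    (ec0, 0)
  res.2

-- ===== PORT B =====
def countFaults_alt (n : Int) (logs : List String) : Int :=
  -- groups = {f's{i}': [] for i in range(1, n+1)}
  let groups0 : PySem.Dict String (List String) :=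
    (PySem.List.pyRange 1 (n+1) 1).foldl
      (fun d i => d.insert ("s" ++ PySem.Int.toStr i) []) PySem.Dict.empty
  let groups := logs.foldl (fun g log =>
      (pvSplitLog log).elim g (fun p => g.insert p.1 (g.getD p.1 [] ++ [p.2])))
    groups0
  groups.values.foldl (fun total statuses =>
      let rt := statuses.foldl (fun (rt : Int × Int) st =>
          if st = "success" then (0, rt.2 + PySem.Int.floordiv rt.1 3)
          else (rt.1 + 1, rt.2)) (0, total)
      rt.2 + PySem.Int.floordiv rt.1 3) 0

-- ===== PRECONDITION & SPEC =====
-- the valid server ids 's1'..'sn'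
def pvKeyList (n : Int) : List String :=
  (PySem.List.pyRange 1 (n+1) 1).map (fun i => "s" ++ PySem.Int.toStr i)

-- Pre_ excludes logs that do not split into exactly two tokens (A raises
-- ValueError) and logs naming a server id outside 's1'..'sn': on an error
-- status for an unseen id A raises KeyError, and A's silent acceptance of an
-- unknown id whose entries start with 'success' is an artefact of dict
-- assignment, on which B's fixed-key dict raises KeyError.
def Pre_countFaults (n : Int) (logs : List String) : Prop :=
  (logs.all (fun log =>
    (pvSplitLog log).elim false (fun p => decide (p.1 ∈ pvKeyList n)))) = true
instance (n : Int) (logs : List String) : Decidable (Pre_countFaults n logs) := by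
  unfold Pre_countFaults; infer_instance

def pvWitness_countFaults : Int × List String :=
  (2, ["s1 error", "s1 error", "s2 success", "s1 error", "s2 error"])

def Spec_countFaults (n : Int) (logs : List String) (out : Int) : Prop := out = countFaults_alt n logs
instance (n : Int) (logs : List String) (out : Int) : Decidable (Spec_countFaults n logs out) := by unfold Spec_countFaults; infer_instance

-- ===== CLAIM (what is proved, stated in full; the proofs are below) =====
def Claim_equal_countFaults : Prop := ∀ (n : Int) (logs : List String), Dom_countFaults n logs → Pre_countFaults n logs → Spec_countFaults n logs (countFaults n logs)

-- ===== LEMMAS AND PROOFS =====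

-- parsed form of a log line (only used under Pre_, where split₀ gives 2 tokens)
def pvParse (log : String) : String × String :=
  (pvSplitLog log).getD ("", "")

-- statuses of server k, in log order
def pvProj (k : String) (ps : List (String × String)) : List String :=
  (ps.filter (fun p => p.1 == k)).map (·.2)

lemma pvProj_cons (k : String) (p : String × String) (ps : List (String × String)) :
    pvProj k (p :: ps) = if p.1 = k then p.2 :: pvProj k ps else pvProj k ps := by
  simp only [pvProj, List.filter_cons]
  by_cases h : p.1 = k <;> simp [h]

-- A's per-server machine: counter c, replace on the 3rd consecutive error
def pvGA : Int → List String → Int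
  | _, [] => 0
  | c, st :: rest =>
    if st = "success" then pvGA 0 rest
    else if c + 1 = 3 then 1 + pvGA 0 rest
    else pvGA (c + 1) rest

-- B's per-server machine: run length r, add r // 3 at the end of each run
def pvGB : Int → List String → Int
  | r, [] => PySem.Int.floordiv r 3
  | r, st :: rest =>
    if st = "success" then PySem.Int.floordiv r 3 + pvGB 0 rest
    else pvGB (r + 1) rest

-- A's loop step, on parsed pairs
def pvStepA (s : PySem.Dict String Int × Int) (p : String × String) :
    PySem.Dict String Int × Int :=
  if p.2 = "success" then (s.1.insert p.1 0, s.2)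
  else
    let c := s.1.getD p.1 0 + 1
    if c = 3 then (s.1.insert p.1 0, s.2 + 1)
    else (s.1.insert p.1 c, s.2)

-- B's grouping step, on parsed pairs
def pvStepG (g : PySem.Dict String (List String)) (p : String × String) :
    PySem.Dict String (List String) :=
  g.insert p.1 (g.getD p.1 [] ++ [p.2])

lemma pv_pre_elim (n : Int) (log : String)
    (h : ((pvSplitLog log).elim false (fun p => decide (p.1 ∈ pvKeyList n))) = true) :
    pvSplitLog log = some (pvParse log) ∧ (pvParse log).1 ∈ pvKeyList n := by
  unfold pvParse
  rcases e : pvSplitLog log with _ | p <;> rw [e] at h <;> simp_all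

lemma pv_getD_const {ν : Type} (v0 : ν) (l : List Int)
    (d : PySem.Dict String ν) (h : ∀ k, d.getD k v0 = v0) (k : String) :
    (l.foldl (fun d i => d.insert ("s" ++ PySem.Int.toStr i) v0) d).getD k v0 = v0 := by
  induction l generalizing d with
  | nil => exact h k
  | cons i l ih =>
    rw [List.foldl_cons]
    exact ih _ (fun k' => by
      rw [PySem.Dict.getD_insert]
      split <;> simp [h])

-- under Pre_, A's fold over raw log lines is the fold of pvStepA over parsed pairs
lemma pv_foldA (logs : List String) (s : PySem.Dict String Int × Int)
    (h : ∀ log ∈ logs, pvSplitLog log = some (pvParse log)) :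
    logs.foldl (fun (s : PySem.Dict String Int × Int) log =>
      (pvSplitLog log).elim s (fun p =>
        if p.2 = "success" then (s.1.insert p.1 0, s.2)
        else
          let c := s.1.getD p.1 0 + 1
          if c = 3 then (s.1.insert p.1 0, s.2 + 1)
          else (s.1.insert p.1 c, s.2))) s
    = (logs.map pvParse).foldl pvStepA s := by
  induction logs generalizing s with
  | nil => rfl
  | cons log logs ih =>
    rw [List.foldl_cons, List.map_cons, List.foldl_cons,
      ← ih _ (fun l hl => h l (List.mem_cons_of_mem _ hl))]
    congr 1
    rw [h log List.mem_cons_self]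
    rfl

-- under Pre_, B's grouping fold is the fold of pvStepG over parsed pairs
lemma pv_foldB (logs : List String) (g : PySem.Dict String (List String))
    (h : ∀ log ∈ logs, pvSplitLog log = some (pvParse log)) :
    logs.foldl (fun g log =>
      (pvSplitLog log).elim g (fun p => g.insert p.1 (g.getD p.1 [] ++ [p.2]))) g
    = (logs.map pvParse).foldl pvStepG g := by
  induction logs generalizing g with
  | nil => rfl
  | cons log logs ih =>
    rw [List.foldl_cons, List.map_cons, List.foldl_cons,
      ← ih _ (fun l hl => h l (List.mem_cons_of_mem _ hl))]
    congr 1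
    rw [h log List.mem_cons_self]
    rfl

lemma pv_sum_congr_except (l : List String) (k0 : String) (δ : Int)
    (f g : String → Int) (hnd : l.Nodup) (hmem : k0 ∈ l)
    (hne : ∀ k ∈ l, k ≠ k0 → f k = g k) (heq : f k0 = δ + g k0) :
    (l.map f).sum = δ + (l.map g).sum := by
  induction l with
  | nil => cases hmem
  | cons a l ih =>
    simp only [List.map_cons, List.sum_cons]
    by_cases ha : a = k0
    · subst ha
      have hnotin : a ∉ l := (List.nodup_cons.mp hnd).1
      have hmap : l.map f = l.map g :=
        List.map_congr_left (fun k hk =>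
          hne k (List.mem_cons_of_mem _ hk) (fun h => hnotin (h ▸ hk)))
      rw [hmap, heq]; ring
    · have hk0l : k0 ∈ l := by
        rcases List.mem_cons.mp hmem with h | h
        · exact absurd h.symm ha
        · exact h
      rw [hne a List.mem_cons_self ha,
        ih (List.nodup_cons.mp hnd).2 hk0l
          (fun k hk hkne => hne k (List.mem_cons_of_mem _ hk) hkne)]
      ring

-- A's interleaved loop = a per-server sum of pvGA over the dict's keys
lemma pv_lemA (ps : List (String × String)) (d : PySem.Dict String Int) (r : Int)
    (hnd : d.keys.Nodup) (hmem : ∀ p ∈ ps, p.1 ∈ d.keys) :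
    (ps.foldl pvStepA (d, r)).2
      = r + (d.keys.map (fun k => pvGA (d.getD k 0) (pvProj k ps))).sum := by
  induction ps generalizing d r with
  | nil =>
    simp only [List.foldl_nil]
    have : d.keys.map (fun k => pvGA (d.getD k 0) (pvProj k [])) = d.keys.map (fun _ => (0:Int)) :=
      List.map_congr_left (fun k _ => by simp [pvProj, pvGA])
    rw [this]
    simp
  | cons p ps ih =>
    have hk : p.1 ∈ d.keys := hmem p List.mem_cons_self
    have hc : d.contains p.1 = true := (PySem.Dict.contains_iff_mem_keys d p.1).mpr hk
    rw [List.foldl_cons]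
    have key_step : ∀ (v : Int) (δ : Int),
        (∀ k, k ≠ p.1 → pvGA (d.getD k 0) (pvProj k (p :: ps)) = pvGA (d.getD k 0) (pvProj k ps)) →
        pvGA (d.getD p.1 0) (pvProj p.1 (p :: ps)) = δ + pvGA v (pvProj p.1 ps) →
        (ps.foldl pvStepA (d.insert p.1 v, r + δ)).2
          = r + (d.keys.map (fun k => pvGA (d.getD k 0) (pvProj k (p :: ps)))).sum := by
      intro v δ hother hself
      have hkeys : (d.insert p.1 v).keys = d.keys := PySem.Dict.keys_insert_of_contains d v hc
      rw [ih (d.insert p.1 v) (r + δ) (by rw [hkeys]; exact hnd)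
        (by rw [hkeys]; exact fun q hq => hmem q (List.mem_cons_of_mem _ hq))]
      rw [hkeys]
      have hsum : (d.keys.map (fun k => pvGA (d.getD k 0) (pvProj k (p :: ps)))).sum
          = δ + (d.keys.map (fun k => pvGA ((d.insert p.1 v).getD k 0) (pvProj k ps))).sum := by
        apply pv_sum_congr_except d.keys p.1 δ _ _ hnd hk
        · intro k hkk hne
          rw [PySem.Dict.getD_insert d p.1 k v 0, if_neg hne, pvProj_cons, if_neg (fun h => hne h.symm)]
        · rw [PySem.Dict.getD_insert d p.1 p.1 v 0, if_pos rfl]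
          exact hself
      rw [hsum]; ring
    by_cases hs : p.2 = "success"
    · have hstep : pvStepA (d, r) p = (d.insert p.1 0, r) := by simp [pvStepA, hs]
      rw [hstep]
      have := key_step 0 0 (fun k hne => by rw [pvProj_cons, if_neg (fun h => hne h.symm)])
        (by rw [pvProj_cons, if_pos rfl, pvGA, if_pos hs, zero_add])
      simpa using this
    · by_cases h3 : d.getD p.1 0 + 1 = 3
      · have hstep : pvStepA (d, r) p = (d.insert p.1 0, r + 1) := by
          simp [pvStepA, hs, h3]
        rw [hstep]
        exact key_step 0 1 (fun k hne => by rw [pvProj_cons, if_neg (fun h => hne h.symm)])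
          (by rw [pvProj_cons, if_pos rfl, pvGA, if_neg hs, if_pos h3])
      · have hstep : pvStepA (d, r) p = (d.insert p.1 (d.getD p.1 0 + 1), r) := by
          simp [pvStepA, hs, h3]
        rw [hstep]
        have := key_step (d.getD p.1 0 + 1) 0 (fun k hne => by rw [pvProj_cons, if_neg (fun h => hne h.symm)])
          (by rw [pvProj_cons, if_pos rfl, pvGA, if_neg hs, if_neg h3, zero_add])
        simpa using this

lemma pv_keysG (ps : List (String × String)) (g : PySem.Dict String (List String))
    (hmem : ∀ p ∈ ps, p.1 ∈ g.keys) : (ps.foldl pvStepG g).keys = g.keys := by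
  induction ps generalizing g with
  | nil => rfl
  | cons p ps ih =>
    have hc : g.contains p.1 = true :=
      (PySem.Dict.contains_iff_mem_keys g p.1).mpr (hmem p List.mem_cons_self)
    have hkeys : (pvStepG g p).keys = g.keys := PySem.Dict.keys_insert_of_contains g _ hc
    rw [List.foldl_cons, ih (pvStepG g p)
      (by rw [hkeys]; exact fun q hq => hmem q (List.mem_cons_of_mem _ hq)), hkeys]

-- B's grouping fold collects, per server, exactly its statuses in order
lemma pv_getDG (ps : List (String × String)) (g : PySem.Dict String (List String))
    (k : String) : (ps.foldl pvStepG g).getD k [] = g.getD k [] ++ pvProj k ps := by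
  induction ps generalizing g with
  | nil => simp [pvProj]
  | cons p ps ih =>
    rw [List.foldl_cons, ih (pvStepG g p), pvProj_cons]
    unfold pvStepG
    by_cases h : p.1 = k
    · subst h
      rw [PySem.Dict.getD_insert, if_pos rfl, if_pos rfl]
      simp
    · rw [PySem.Dict.getD_insert, if_neg (fun hh => h hh.symm), if_neg h]

lemma pv_fd (a : Int) : PySem.Int.floordiv a 3 = a / 3 := by
  rw [PySem.Int.floordiv, Int.fdiv_eq_ediv]; norm_num

-- B's inner run-counting loop, with its trailing run flushed, is pvGB
lemma pv_inner (sts : List String) (r t : Int) :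
    (sts.foldl (fun (rt : Int × Int) st =>
        if st = "success" then (0, rt.2 + PySem.Int.floordiv rt.1 3)
        else (rt.1 + 1, rt.2)) (r, t)).2
      + PySem.Int.floordiv (sts.foldl (fun (rt : Int × Int) st =>
        if st = "success" then (0, rt.2 + PySem.Int.floordiv rt.1 3)
        else (rt.1 + 1, rt.2)) (r, t)).1 3 = t + pvGB r sts := by
  induction sts generalizing r t with
  | nil => simp [pvGB]
  | cons st rest ih =>
    rw [List.foldl_cons]
    by_cases h : st = "success"
    · rw [if_pos h]
      show (List.foldl _ ((0 : Int), t + PySem.Int.floordiv r 3) rest).2 + _ = _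
      rw [ih 0 (t + PySem.Int.floordiv r 3), pvGB, if_pos h]
      ring
    · rw [if_neg h]
      show (List.foldl _ (r + 1, t) rest).2 + _ = _
      rw [ih (r + 1) t, pvGB, if_neg h]

-- B's run counting agrees with A's mod-3 counter machine
lemma pv_gAB (sts : List String) (r : Int) (hr : 0 ≤ r) :
    pvGB r sts = r / 3 + pvGA (r % 3) sts := by
  induction sts generalizing r with
  | nil => simp [pvGB, pvGA]
  | cons st rest ih =>
    rw [pvGB, pvGA]
    by_cases h : st = "success"
    · rw [if_pos h, if_pos h, ih 0 le_rfl, pv_fd]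
      norm_num
    · rw [if_neg h, if_neg h, ih (r + 1) (by omega)]
      by_cases hm : r % 3 = 2
      · have h1 : (r + 1) / 3 = r / 3 + 1 := by omega
        have h2 : (r + 1) % 3 = 0 := by omega
        have h3 : r % 3 + 1 = 3 := by omega
        rw [h1, h2, if_pos h3]; ring
      · have h1 : (r + 1) / 3 = r / 3 := by omega
        have h2 : (r + 1) % 3 = r % 3 + 1 := by omega
        have h3 : ¬ (r % 3 + 1 = 3) := by omega
        rw [h1, h2, if_neg h3]

-- ===== VERDICT (by name: the statement is the Claim_ definition above) =====
theorem countFaults_spec : Claim_equal_countFaults := by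
  intro n logs _ hpre
  unfold Spec_countFaults countFaults countFaults_alt
  have hlogs : ∀ log ∈ logs,
      pvSplitLog log = some (pvParse log) ∧ (pvParse log).1 ∈ pvKeyList n :=
    fun log hl => pv_pre_elim n log (List.all_eq_true.mp hpre log hl)
  show (logs.foldl (fun (s : PySem.Dict String Int × Int) log =>
      (pvSplitLog log).elim s (fun p =>
        if p.2 = "success" then (s.1.insert p.1 0, s.2)
        else
          if s.1.getD p.1 0 + 1 = 3 then (s.1.insert p.1 0, s.2 + 1)
          else (s.1.insert p.1 (s.1.getD p.1 0 + 1), s.2)))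
      ((PySem.List.pyRange 1 (n+1) 1).foldl
        (fun d i => d.insert ("s" ++ PySem.Int.toStr i) 0) PySem.Dict.empty, 0)).2
    = ((logs.foldl (fun g log =>
        (pvSplitLog log).elim g (fun p => g.insert p.1 (g.getD p.1 [] ++ [p.2])))
        ((PySem.List.pyRange 1 (n+1) 1).foldl
          (fun d i => d.insert ("s" ++ PySem.Int.toStr i) []) PySem.Dict.empty)).values.foldl
      (fun (total : Int) (statuses : List String) =>
        (statuses.foldl (fun (rt : Int × Int) st =>
            if st = "success" then (0, rt.2 + PySem.Int.floordiv rt.1 3)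
            else (rt.1 + 1, rt.2)) (0, total)).2
          + PySem.Int.floordiv (statuses.foldl (fun (rt : Int × Int) st =>
            if st = "success" then (0, rt.2 + PySem.Int.floordiv rt.1 3)
            else (rt.1 + 1, rt.2)) (0, total)).1 3) 0)
  set ps := logs.map pvParse with hps
  set ec0 : PySem.Dict String Int :=
    (PySem.List.pyRange 1 (n+1) 1).foldl
      (fun d i => d.insert ("s" ++ PySem.Int.toStr i) 0) PySem.Dict.empty with hec0
  set g0 : PySem.Dict String (List String) :=
    (PySem.List.pyRange 1 (n+1) 1).foldl
      (fun d i => d.insert ("s" ++ PySem.Int.toStr i) []) PySem.Dict.empty with hg0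
  have hkeysA : ec0.keys = PySem.Set.ofList (pvKeyList n) := by
    rw [hec0, PySem.Dict.keys_foldl_insert_key _ (fun i => "s" ++ PySem.Int.toStr i)
      (fun _ _ => 0) PySem.Dict.empty]
    rfl
  have hkeysB : g0.keys = PySem.Set.ofList (pvKeyList n) := by
    rw [hg0, PySem.Dict.keys_foldl_insert_key _ (fun i => "s" ++ PySem.Int.toStr i)
      (fun _ _ => []) PySem.Dict.empty]
    rfl
  have hnodA : ec0.keys.Nodup := by rw [hkeysA]; exact PySem.Set.nodup_ofList _
  have hmemps : ∀ p ∈ ps, p.1 ∈ PySem.Set.ofList (pvKeyList n) := by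
    intro p hp
    rcases List.mem_map.mp hp with ⟨log, hl, rfl⟩
    exact (PySem.Set.mem_ofList _ _).mpr (hlogs log hl).2
  -- A's side
  rw [pv_foldA logs _ (fun l hl => (hlogs l hl).1)]
  rw [pv_lemA ps ec0 0 hnodA (by rw [hkeysA]; exact hmemps)]
  have hgdA : ∀ k, ec0.getD k 0 = 0 := by
    intro k
    rw [hec0]
    exact pv_getD_const 0 _ PySem.Dict.empty (fun k' => by simp) k
  -- B's side
  rw [pv_foldB logs _ (fun l hl => (hlogs l hl).1)]
  set groups := ps.foldl pvStepG g0 with hgroups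
  have hkeysG : groups.keys = PySem.Set.ofList (pvKeyList n) := by
    rw [hgroups, pv_keysG ps g0 (by rw [hkeysB]; exact hmemps), hkeysB]
  have hbody : (fun (total : Int) (statuses : List String) =>
      (statuses.foldl (fun (rt : Int × Int) st =>
          if st = "success" then (0, rt.2 + PySem.Int.floordiv rt.1 3)
          else (rt.1 + 1, rt.2)) (0, total)).2
        + PySem.Int.floordiv (statuses.foldl (fun (rt : Int × Int) st =>
          if st = "success" then (0, rt.2 + PySem.Int.floordiv rt.1 3)
          else (rt.1 + 1, rt.2)) (0, total)).1 3)
      = fun (total : Int) (statuses : List String) => total + pvGB 0 statuses := by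
    funext t sts
    exact pv_inner sts 0 t
  rw [hbody, PySem.List.foldl_add groups.values (pvGB 0) 0]
  -- values of the groups dict
  have hnodG : groups.keys.Nodup := by rw [hkeysG]; exact PySem.Set.nodup_ofList _
  rw [PySem.Dict.values_eq_map_keys groups hnodG [], List.map_map, hkeysG, hkeysA]
  congr 1
  congr 1
  apply List.map_congr_left
  intro k _
  have hg : groups.getD k [] = pvProj k ps := by
    rw [hgroups, pv_getDG ps g0 k, hg0]
    rw [pv_getD_const [] _ PySem.Dict.empty (fun k' => by simp) k]
    rfl
  show pvGA (ec0.getD k 0) (pvProj k ps) = pvGB 0 (groups.getD k [])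
  rw [hgdA k, hg, pv_gAB (pvProj k ps) 0 le_rfl]
  norm_num
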